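-- pv_equiv track=rewrite | github.com/ghager93/convexcurveshortening | _neighbour_array.py | _number_of_01_patterns_in_ordered_neighbours_set
-- ===== SOURCE A (Python) =====
-- def _number_of_01_patterns_in_ordered_neighbours_set(b: int):
--     mask = 0b11000000
--     pattern = 0b01000000
--     cnt = 0
--     for _ in range(7):
--         if mask & b == pattern:
--             cnt += 1
--         mask >>= 1
--         pattern >>= 1
--
--     if 0b10000001 & b == 0b10000000:
--         cnt += 1
--
--     return cnt
-- ===== SOURCE B (Python) =====
-- def _number_of_01_patterns_in_ordered_neighbours_set(b: int):
--     s = format(b & 0xFF, '08b')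
--     return (s + s[0]).count('01')
-- ===== Notes on version B (the rewrite author's own statement) =====
-- stated objective: idiomatic
-- what changed: Replaces the 7-step mask/pattern shifting loop plus wraparound special case by rendering the byte as its MSB-first 8-bit string, appending the first character for the circular wraparound, and counting '01' substrings.
import Mathlib
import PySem

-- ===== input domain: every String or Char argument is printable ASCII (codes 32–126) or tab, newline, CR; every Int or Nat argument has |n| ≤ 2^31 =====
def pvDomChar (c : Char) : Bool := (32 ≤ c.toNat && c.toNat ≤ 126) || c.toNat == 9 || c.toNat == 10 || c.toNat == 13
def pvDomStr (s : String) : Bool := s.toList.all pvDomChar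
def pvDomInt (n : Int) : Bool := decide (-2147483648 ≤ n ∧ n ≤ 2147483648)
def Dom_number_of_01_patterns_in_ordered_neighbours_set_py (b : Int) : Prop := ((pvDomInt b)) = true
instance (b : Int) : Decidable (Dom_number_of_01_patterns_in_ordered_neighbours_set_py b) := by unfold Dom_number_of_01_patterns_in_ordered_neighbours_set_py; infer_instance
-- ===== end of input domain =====

-- B counts '01' substrings in the circularly-extended MSB-first 8-bit string of b & 0xFF
-- instead of A's 7-step mask/pattern shifting loop plus wraparound special case (same cost, more idiomatic).

-- ===== PORT A =====
def number_of_01_patterns_in_ordered_neighbours_set_py (b : Int) : Int :=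
  -- mask = 0b11000000; pattern = 0b01000000; cnt = 0; for _ in range(7): …
  let s := (PySem.List.pyRange 0 7 1).foldl
    (fun (st : Int × Int × Int) (_ : Int) =>
      let mask := st.1
      let pattern := st.2.1
      let cnt := st.2.2
      let cnt := if PySem.Int.band mask b == pattern then cnt + 1 else cnt
      (mask >>> (1 : Nat), pattern >>> (1 : Nat), cnt))
    (192, 64, 0)
  let cnt := s.2.2
  if PySem.Int.band 129 b == 128 then cnt + 1 else cnt

-- ===== PORT B =====
def number_of_01_patterns_in_ordered_neighbours_set_py_alt (b : Int) : Int :=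
  -- s = format(b & 0xFF, '08b'): binary digits of the masked byte (always nonnegative),
  -- zero-padded on the left to width 8 — exactly toBinChars + zfill for a nonnegative value
  let s := PySem.Chars.zfill (PySem.Int.toBinChars (PySem.Int.band b 255)) 8
  -- return (s + s[0]).count('01');  s has 8 chars, so s[0] is s.take 1
  ((PySem.Chars.count (s ++ s.take 1) ['0', '1'] : Nat) : Int)

-- ===== PRECONDITION & SPEC =====
def Spec_number_of_01_patterns_in_ordered_neighbours_set_py (b : Int) (out : Int) : Prop := out = number_of_01_patterns_in_ordered_neighbours_set_py_alt b
instance (b : Int) (out : Int) : Decidable (Spec_number_of_01_patterns_in_ordered_neighbours_set_py b out) := by unfold Spec_number_of_01_patterns_in_ordered_neighbours_set_py; infer_instance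

-- ===== CLAIM (what is proved, stated in full; the proofs are below) =====
def Claim_equal_number_of_01_patterns_in_ordered_neighbours_set_py : Prop := ∀ (b : Int), Dom_number_of_01_patterns_in_ordered_neighbours_set_py b → Spec_number_of_01_patterns_in_ordered_neighbours_set_py b (number_of_01_patterns_in_ordered_neighbours_set_py b)

-- ===== LEMMAS AND PROOFS =====

-- the canonical representative of b modulo 256 on each side of zero:
-- for b ≥ 0 the least nonnegative b' ≡ b (mod 256), for b < 0 the greatest negative one
def pvRed (b : Int) : Int :=
  if 0 ≤ b then ((b.toNat % 256 : Nat) : Int) else -(((-b - 1).toNat % 256 : Nat) : Int) - 1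

theorem pvNatMask (m x : Nat) (hm : m < 256) : m &&& x = m &&& (x % 256) := by
  apply Nat.eq_of_testBit_eq
  intro i
  rw [Nat.testBit_and, Nat.testBit_and,
      show (256 : Nat) = 2 ^ 8 from by norm_num, Nat.testBit_mod_two_pow]
  by_cases h : i < 8
  · simp [h]
  · have hm' : m.testBit i = false :=
      Nat.testBit_lt_two_pow (lt_of_lt_of_le hm (by
        calc (256 : Nat) = 2 ^ 8 := by norm_num
          _ ≤ 2 ^ i := Nat.pow_le_pow_right (by norm_num) (by omega)))
    simp [hm', h]

theorem pvBandRed (m b : Int) (h0 : 0 ≤ m) (hm : m < 256) :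
    PySem.Int.band m b = PySem.Int.band m (pvRed b) := by
  by_cases hb : 0 ≤ b
  · have hr : pvRed b = ((b.toNat % 256 : Nat) : Int) := by simp [pvRed, hb]
    rw [hr, PySem.Int.band_of_nonneg h0 hb, PySem.Int.band_of_nonneg h0 (by positivity)]
    simp only [Int.toNat_natCast]
    exact congrArg _ (pvNatMask m.toNat b.toNat (by omega))
  · have hr : pvRed b = -(((-b - 1).toNat % 256 : Nat) : Int) - 1 := by simp [pvRed, hb]
    have hneg : ¬ (0 : Int) ≤ -(((-b - 1).toNat % 256 : Nat) : Int) - 1 := by omega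
    rw [hr]
    simp only [PySem.Int.band]
    rw [if_pos h0, if_neg hb, if_pos h0, if_neg hneg]
    have h1 : (-(-(((-b - 1).toNat % 256 : Nat) : Int) - 1) - 1).toNat = (-b - 1).toNat % 256 := by
      omega
    rw [h1, pvNatMask m.toNat (-b - 1).toNat (by omega)]

theorem pvShiftHalf (m : Int) : m >>> (1 : Nat) = m / 2 := by
  rw [Int.shiftRight_eq_div_pow]; norm_num

theorem pvFoldRed (b : Int) (l : List Int) : ∀ (mask pattern cnt : Int), 0 ≤ mask → mask < 256 →
    l.foldl
      (fun (st : Int × Int × Int) (_ : Int) =>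
        let mask := st.1
        let pattern := st.2.1
        let cnt := st.2.2
        let cnt := if PySem.Int.band mask b == pattern then cnt + 1 else cnt
        (mask >>> (1 : Nat), pattern >>> (1 : Nat), cnt))
      (mask, pattern, cnt)
    = l.foldl
      (fun (st : Int × Int × Int) (_ : Int) =>
        let mask := st.1
        let pattern := st.2.1
        let cnt := st.2.2
        let cnt := if PySem.Int.band mask (pvRed b) == pattern then cnt + 1 else cnt
        (mask >>> (1 : Nat), pattern >>> (1 : Nat), cnt))
      (mask, pattern, cnt) := by
  induction l with
  | nil => intro mask pattern cnt _ _; rfl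
  | cons x xs ih =>
    intro mask pattern cnt h0 h1
    simp only [List.foldl_cons]
    rw [show PySem.Int.band mask b = PySem.Int.band mask (pvRed b) from pvBandRed mask b h0 h1]
    exact ih (mask >>> (1 : Nat)) (pattern >>> (1 : Nat)) _
      (by rw [pvShiftHalf]; omega) (by rw [pvShiftHalf]; omega)

theorem pvARed (b : Int) :
    number_of_01_patterns_in_ordered_neighbours_set_py b
      = number_of_01_patterns_in_ordered_neighbours_set_py (pvRed b) := by
  simp only [number_of_01_patterns_in_ordered_neighbours_set_py]
  rw [pvFoldRed b (PySem.List.pyRange 0 7 1) 192 64 0 (by norm_num) (by norm_num),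
      pvBandRed 129 b (by norm_num) (by norm_num)]

theorem pvBRed (b : Int) :
    number_of_01_patterns_in_ordered_neighbours_set_py_alt b
      = number_of_01_patterns_in_ordered_neighbours_set_py_alt (pvRed b) := by
  simp only [number_of_01_patterns_in_ordered_neighbours_set_py_alt]
  rw [PySem.Int.band_comm b 255, pvBandRed 255 b (by norm_num) (by norm_num),
      PySem.Int.band_comm 255 (pvRed b)]

theorem pvRedRange (b : Int) : -256 ≤ pvRed b ∧ pvRed b < 256 := by
  simp only [pvRed]; split_ifs <;> omega

set_option maxHeartbeats 4000000 in
set_option maxRecDepth 100000 in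
theorem pvKey : ∀ k : Fin 512,
    number_of_01_patterns_in_ordered_neighbours_set_py ((k.val : Int) - 256)
      = number_of_01_patterns_in_ordered_neighbours_set_py_alt ((k.val : Int) - 256) := by
  decide

-- ===== VERDICT (by name: the statement is the Claim_ definition above) =====
theorem number_of_01_patterns_in_ordered_neighbours_set_py_spec : Claim_equal_number_of_01_patterns_in_ordered_neighbours_set_py := by
  intro b _
  unfold Spec_number_of_01_patterns_in_ordered_neighbours_set_py
  obtain ⟨hlo, hhi⟩ := pvRedRange b
  have hk := pvKey ⟨(pvRed b + 256).toNat, by omega⟩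
  have hv : (((pvRed b + 256).toNat : Nat) : Int) - 256 = pvRed b := by omega
  simp only [hv] at hk
  rw [pvARed b, pvBRed b]
  exact hk
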